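-- pv_equiv track=rewrite | github.com/oimeitei/fragpy | fragpy/bon_angle_dih.py | hangle
-- ===== SOURCE A (Python) =====
-- def hangle(list1,list2,lenHbon):  # Hbondlist, nonHbondlist
--     hangl=[]
--     for i in list1[lenHbon:]:
--         tmpii=[]
--         for j in list2:
--             if i[1]==j[0]:
--                 tmpii.append(j[1])
--             elif i[1]==j[1]:
--                 tmpii.append(j[0])
--                 #tmpii=j[1]
--         for j in tmpii:
--             if not [j,i[1],i[0]] in hangl:
--                 hangl.append([i[0],i[1],j])
--         tmpii = []
--         for j in list1[lenHbon:]: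
--             if (i[1] == j[1] and not i[0] == j[0]):
--                 tmpii.append(j[0])
--         for j in tmpii:
--             if not [j,i[1],i[0]] in hangl:
--                 hangl.append([i[0],i[1],j])
--     return hangl
-- ===== SOURCE B (Python) =====
-- def hangle(list1, list2, lenHbon):  # Hbondlist, nonHbondlist
--     sub = list1[lenHbon:]
--     # index list2 by both endpoints: nbr[v] = neighbours of v in list2 order
--     nbr = {}
--     for j in list2:
--         a, b = j[0], j[1]
--         nbr.setdefault(a, []).append(b)
--         if b != a:
--             nbr.setdefault(b, []).append(a)
--     # index sub by second endpoint: cen[v] = first endpoints of sub-edges ending in v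
--     cen = {}
--     for j in sub:
--         cen.setdefault(j[1], []).append(j[0])
--     hangl = []
--     seen = set()  # tuples of the triples already in hangl
--     for i in sub:
--         i0, i1 = i[0], i[1]
--         for j in nbr.get(i1, []):
--             if (j, i1, i0) not in seen:
--                 hangl.append([i0, i1, j])
--                 seen.add((i0, i1, j))
--         for x in cen.get(i1, []):
--             if x != i0 and (x, i1, i0) not in seen:
--                 hangl.append([i0, i1, x])
--                 seen.add((i0, i1, x))
--     return hangl
-- ===== Notes on version B (the rewrite author's own statement) =====
-- stated objective: alternative
-- what changed: B pre-indexes list2 by both endpoints and the sliced list1 by second endpoint into dicts, and keeps the appended triples in a set, so both inner scans and the linear membership test in hangl disappear.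
-- outside the precondition, e.g. on hangle([], [[1]], 0): A returns [], B raises IndexError
import Mathlib
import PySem

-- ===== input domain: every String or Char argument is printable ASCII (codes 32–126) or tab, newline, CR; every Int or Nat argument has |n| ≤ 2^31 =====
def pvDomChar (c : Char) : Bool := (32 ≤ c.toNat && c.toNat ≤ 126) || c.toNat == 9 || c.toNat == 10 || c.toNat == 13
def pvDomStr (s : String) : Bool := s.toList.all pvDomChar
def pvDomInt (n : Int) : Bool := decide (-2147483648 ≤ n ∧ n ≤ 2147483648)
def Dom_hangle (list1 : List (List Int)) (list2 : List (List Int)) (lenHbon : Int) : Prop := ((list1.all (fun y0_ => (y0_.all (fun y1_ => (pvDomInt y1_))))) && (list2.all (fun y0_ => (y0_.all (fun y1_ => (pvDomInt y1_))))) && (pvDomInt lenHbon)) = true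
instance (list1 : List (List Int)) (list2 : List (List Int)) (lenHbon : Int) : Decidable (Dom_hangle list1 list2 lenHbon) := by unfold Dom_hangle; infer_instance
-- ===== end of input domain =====

-- B replaces A's inner scans of list2/list1 by dict indexes and the linear membership test by a set of the appended triples (same return value; neither version mutates its arguments).

-- ===== PORT A =====
def hangle (list1 : List (List Int)) (list2 : List (List Int)) (lenHbon : Int) : List (List Int) :=
  (PySem.List.slice list1 (some lenHbon) none).foldl (fun hangl i =>
    let tmpii : List Int := list2.foldl (fun t j =>
      if PySem.List.pyGetD i 1 0 = PySem.List.pyGetD j 0 0 then t ++ [PySem.List.pyGetD j 1 0]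
      else if PySem.List.pyGetD i 1 0 = PySem.List.pyGetD j 1 0 then t ++ [PySem.List.pyGetD j 0 0]
      else t) []
    let hangl := tmpii.foldl (fun h j =>
      if [j, PySem.List.pyGetD i 1 0, PySem.List.pyGetD i 0 0] ∈ h then h
      else h ++ [[PySem.List.pyGetD i 0 0, PySem.List.pyGetD i 1 0, j]]) hangl
    let tmpii2 : List Int := (PySem.List.slice list1 (some lenHbon) none).foldl (fun t j =>
      if PySem.List.pyGetD i 1 0 = PySem.List.pyGetD j 1 0 ∧ ¬ PySem.List.pyGetD i 0 0 = PySem.List.pyGetD j 0 0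
      then t ++ [PySem.List.pyGetD j 0 0] else t) []
    tmpii2.foldl (fun h j =>
      if [j, PySem.List.pyGetD i 1 0, PySem.List.pyGetD i 0 0] ∈ h then h
      else h ++ [[PySem.List.pyGetD i 0 0, PySem.List.pyGetD i 1 0, j]]) hangl) []

-- ===== PORT B =====
def hangle_alt (list1 : List (List Int)) (list2 : List (List Int)) (lenHbon : Int) : List (List Int) :=
  let sub := PySem.List.slice list1 (some lenHbon) none
  let nbr : PySem.Dict Int (List Int) := list2.foldl (fun d j =>
    let a := PySem.List.pyGetD j 0 0
    let b := PySem.List.pyGetD j 1 0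
    let d := d.modify a [] (· ++ [b])
    if b ≠ a then d.modify b [] (· ++ [a]) else d) PySem.Dict.empty
  let cen : PySem.Dict Int (List Int) := sub.foldl (fun d j =>
    d.modify (PySem.List.pyGetD j 1 0) [] (· ++ [PySem.List.pyGetD j 0 0])) PySem.Dict.empty
  (sub.foldl (fun (st : List (List Int) × PySem.Set (Int × Int × Int)) i =>
    let i0 := PySem.List.pyGetD i 0 0
    let i1 := PySem.List.pyGetD i 1 0
    let st := (nbr.getD i1 []).foldl (fun st j =>
      if PySem.Set.contains st.2 (j, i1, i0) then st
      else (st.1 ++ [[i0, i1, j]], st.2.add (i0, i1, j))) st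
    (cen.getD i1 []).foldl (fun st x =>
      if x ≠ i0 ∧ ¬ PySem.Set.contains st.2 (x, i1, i0) = true
      then (st.1 ++ [[i0, i1, x]], st.2.add (i0, i1, x)) else st) st)
    (([] : List (List Int)), (PySem.Set.empty : PySem.Set (Int × Int × Int)))).1

-- ===== PRECONDITION & SPEC =====
-- Pre_ excludes rows of fewer than 2 entries in list2 or in list1[lenHbon:]: on those Python A raises
-- IndexError whenever list1[lenHbon:] is nonempty, and B (which indexes list2 up front) raises even when
-- it is empty, where A still returns [] — that corner is excluded and cited.
def Pre_hangle (list1 : List (List Int)) (list2 : List (List Int)) (lenHbon : Int) : Prop :=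
  (∀ r ∈ PySem.List.slice list1 (some lenHbon) none, 2 ≤ r.length) ∧ (∀ r ∈ list2, 2 ≤ r.length)
instance (list1 : List (List Int)) (list2 : List (List Int)) (lenHbon : Int) : Decidable (Pre_hangle list1 list2 lenHbon) := by unfold Pre_hangle; infer_instance

def pvWitness_hangle : List (List Int) × List (List Int) × Int :=
  ([[1, 2], [3, 2]], [[2, 4], [5, 2]], 0)

def Spec_hangle (list1 : List (List Int)) (list2 : List (List Int)) (lenHbon : Int) (out : List (List Int)) : Prop := out = hangle_alt list1 list2 lenHbon
instance (list1 : List (List Int)) (list2 : List (List Int)) (lenHbon : Int) (out : List (List Int)) : Decidable (Spec_hangle list1 list2 lenHbon out) := by unfold Spec_hangle; infer_instance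

-- ===== CLAIM (what is proved, stated in full; the proofs are below) =====
def Claim_equal_hangle : Prop := ∀ (list1 : List (List Int)) (list2 : List (List Int)) (lenHbon : Int), Dom_hangle list1 list2 lenHbon → Pre_hangle list1 list2 lenHbon → Spec_hangle list1 list2 lenHbon (hangle list1 list2 lenHbon)

-- ===== LEMMAS AND PROOFS =====

-- per-edge contribution of a list2 row to the neighbour list of k (A's if/elif)
def pvContrib (k : Int) (j : List Int) : List Int :=
  if k = PySem.List.pyGetD j 0 0 then [PySem.List.pyGetD j 1 0]
  else if k = PySem.List.pyGetD j 1 0 then [PySem.List.pyGetD j 0 0] else []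

-- per-edge contribution of a sub row to cen[k]
def pvContrib2 (k : Int) (j : List Int) : List Int :=
  if k = PySem.List.pyGetD j 1 0 then [PySem.List.pyGetD j 0 0] else []

-- the invariant tying hangl to seen
def pvInv (h : List (List Int)) (s : PySem.Set (Int × Int × Int)) : Prop :=
  ∀ a b c : Int, (a, b, c) ∈ s ↔ [a, b, c] ∈ h

-- A's tmpii fold produces the flatMap of pvContrib
theorem pv_tmpii_eq (k : Int) (l : List (List Int)) (init : List Int) :
    l.foldl (fun t j =>
      if k = PySem.List.pyGetD j 0 0 then t ++ [PySem.List.pyGetD j 1 0]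
      else if k = PySem.List.pyGetD j 1 0 then t ++ [PySem.List.pyGetD j 0 0]
      else t) init = init ++ l.flatMap (pvContrib k) := by
  induction l generalizing init with
  | nil => simp
  | cons j l ih =>
      simp only [List.foldl_cons, List.flatMap_cons, ih, pvContrib]
      split_ifs <;> simp

-- B's nbr dict lookup agrees with A's scan of list2
theorem pv_nbr_getD (k : Int) (l : List (List Int)) (d : PySem.Dict Int (List Int)) :
    (l.foldl (fun d j =>
      let a := PySem.List.pyGetD j 0 0
      let b := PySem.List.pyGetD j 1 0
      let d := d.modify a [] (· ++ [b])
      if b ≠ a then d.modify b [] (· ++ [a]) else d) d).getD k []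
    = d.getD k [] ++ l.flatMap (pvContrib k) := by
  induction l generalizing d with
  | nil => simp
  | cons j l ih =>
      simp only [List.foldl_cons, List.flatMap_cons, ih, ← List.append_assoc]
      congr 1
      by_cases hba : PySem.List.pyGetD j 1 0 = PySem.List.pyGetD j 0 0
      · simp only [hba, ne_eq, not_true_eq_false, if_false, pvContrib,
          PySem.Dict.getD_modify]
        split_ifs <;> simp_all
      · simp only [ne_eq, hba, not_false_eq_true, if_true, pvContrib,
          PySem.Dict.getD_modify]
        split_ifs <;> simp_all

-- A's tmpii2 fold produces the flatMap of the filtered pvContrib2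
theorem pv_tmpii2_eq (i0 k : Int) (l : List (List Int)) (init : List Int) :
    l.foldl (fun t j =>
      if k = PySem.List.pyGetD j 1 0 ∧ ¬ i0 = PySem.List.pyGetD j 0 0
      then t ++ [PySem.List.pyGetD j 0 0] else t) init
    = init ++ (l.flatMap (pvContrib2 k)).filter (fun x => x ≠ i0) := by
  induction l generalizing init with
  | nil => simp
  | cons j l ih =>
      simp only [List.foldl_cons, List.flatMap_cons, List.filter_append, ← List.append_assoc]
      rw [ih]
      congr 1
      by_cases h1 : k = PySem.List.pyGetD j 1 0 <;>
        by_cases h2 : i0 = PySem.List.pyGetD j 0 0 <;>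
          simp_all [pvContrib2, eq_comm]

-- B's cen dict lookup agrees with A's scan of sub
theorem pv_cen_getD (k : Int) (l : List (List Int)) (d : PySem.Dict Int (List Int)) :
    (l.foldl (fun d j =>
      d.modify (PySem.List.pyGetD j 1 0) [] (· ++ [PySem.List.pyGetD j 0 0])) d).getD k []
    = d.getD k [] ++ l.flatMap (pvContrib2 k) := by
  induction l generalizing d with
  | nil => simp
  | cons j l ih =>
      simp only [List.foldl_cons, List.flatMap_cons, ih, pvContrib2, PySem.Dict.getD_modify]
      split_ifs <;> simp_all

-- the common inner loop: A appends into hangl, B additionally tracks seen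
theorem pv_inner_eq (i0 i1 : Int) (tm : List Int) (h : List (List Int))
    (s : PySem.Set (Int × Int × Int)) (hinv : pvInv h s) :
    (tm.foldl (fun st j =>
      if PySem.Set.contains st.2 (j, i1, i0) then st
      else (st.1 ++ [[i0, i1, j]], st.2.add (i0, i1, j))) (h, s)).1
      = tm.foldl (fun h j => if [j, i1, i0] ∈ h then h else h ++ [[i0, i1, j]]) h
    ∧ pvInv (tm.foldl (fun h j => if [j, i1, i0] ∈ h then h else h ++ [[i0, i1, j]]) h)
        (tm.foldl (fun st j =>
          if PySem.Set.contains st.2 (j, i1, i0) then st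
          else (st.1 ++ [[i0, i1, j]], st.2.add (i0, i1, j))) (h, s)).2 := by
  induction tm generalizing h s with
  | nil => exact ⟨rfl, hinv⟩
  | cons j tm ih =>
      have hc : PySem.Set.contains s (j, i1, i0) = true ↔ [j, i1, i0] ∈ h := by
        rw [← hinv j i1 i0]
        simp [PySem.Set.contains]
      by_cases hm : [j, i1, i0] ∈ h
      · simp only [List.foldl_cons, hc.mpr hm, if_true, if_pos hm]
        exact ih h s hinv
      · have hc' : ¬ PySem.Set.contains s (j, i1, i0) = true := fun hh => hm (hc.mp hh)
        simp only [List.foldl_cons, if_neg hc', if_neg hm]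
        apply ih
        intro a b c
        simp only [PySem.Set.mem_add, List.mem_append, hinv a b c, List.mem_singleton]
        constructor
        · rintro (hx | hx)
          · exact Or.inl hx
          · right; simp_all
        · rintro (hx | hx)
          · exact Or.inl hx
          · right; simp_all


-- pair form of pv_inner_eq
theorem pv_inner_eq' (i0 i1 : Int) (tm : List Int)
    (st : List (List Int) × PySem.Set (Int × Int × Int)) (hinv : pvInv st.1 st.2) :
    (tm.foldl (fun st j =>
      if PySem.Set.contains st.2 (j, i1, i0) then st
      else (st.1 ++ [[i0, i1, j]], st.2.add (i0, i1, j))) st).1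
      = tm.foldl (fun h j => if [j, i1, i0] ∈ h then h else h ++ [[i0, i1, j]]) st.1
    ∧ pvInv (tm.foldl (fun h j => if [j, i1, i0] ∈ h then h else h ++ [[i0, i1, j]]) st.1)
        (tm.foldl (fun st j =>
          if PySem.Set.contains st.2 (j, i1, i0) then st
          else (st.1 ++ [[i0, i1, j]], st.2.add (i0, i1, j))) st).2 := by
  obtain ⟨a, b⟩ := pv_inner_eq i0 i1 tm st.1 st.2 hinv
  exact ⟨a, b⟩

-- fold of a guarded step = fold of the step over the filtered list
theorem pv_fold_filter {α σ : Type} (f : σ → α → σ) (p : α → Bool) (tm : List α) (st : σ) :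
    tm.foldl (fun st x => if p x then f st x else st) st = (tm.filter p).foldl f st := by
  induction tm generalizing st with
  | nil => rfl
  | cons x tm ih =>
      by_cases hp : p x
      · simp [hp, ih]
      · simp [hp, ih]

-- B's guarded second inner step is the first-shape step gated on x ≠ i0
theorem pv_step2_eq (i0 i1 : Int) (x : Int) (st : List (List Int) × PySem.Set (Int × Int × Int)) :
    (if x ≠ i0 ∧ ¬ PySem.Set.contains st.2 (x, i1, i0) = true
     then (st.1 ++ [[i0, i1, x]], st.2.add (i0, i1, x)) else st)
    = if decide (x ≠ i0) then
        (if PySem.Set.contains st.2 (x, i1, i0) then st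
         else (st.1 ++ [[i0, i1, x]], st.2.add (i0, i1, x)))
      else st := by
  by_cases h1 : x = i0
  · simp [h1]
  · simp only [ne_eq, h1, not_false_eq_true, true_and, decide_true, if_true]
    rw [ite_not]

-- named step functions (definitionally the port bodies)
def pvStepA (list2 sub : List (List Int)) (hangl : List (List Int)) (i : List Int) :
    List (List Int) :=
  let tmpii : List Int := list2.foldl (fun t j =>
    if PySem.List.pyGetD i 1 0 = PySem.List.pyGetD j 0 0 then t ++ [PySem.List.pyGetD j 1 0]
    else if PySem.List.pyGetD i 1 0 = PySem.List.pyGetD j 1 0 then t ++ [PySem.List.pyGetD j 0 0]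
    else t) []
  let hangl := tmpii.foldl (fun h j =>
    if [j, PySem.List.pyGetD i 1 0, PySem.List.pyGetD i 0 0] ∈ h then h
    else h ++ [[PySem.List.pyGetD i 0 0, PySem.List.pyGetD i 1 0, j]]) hangl
  let tmpii2 : List Int := sub.foldl (fun t j =>
    if PySem.List.pyGetD i 1 0 = PySem.List.pyGetD j 1 0 ∧ ¬ PySem.List.pyGetD i 0 0 = PySem.List.pyGetD j 0 0
    then t ++ [PySem.List.pyGetD j 0 0] else t) []
  tmpii2.foldl (fun h j =>
    if [j, PySem.List.pyGetD i 1 0, PySem.List.pyGetD i 0 0] ∈ h then h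
    else h ++ [[PySem.List.pyGetD i 0 0, PySem.List.pyGetD i 1 0, j]]) hangl

def pvStepB (nbr cen : PySem.Dict Int (List Int))
    (st : List (List Int) × PySem.Set (Int × Int × Int)) (i : List Int) :
    List (List Int) × PySem.Set (Int × Int × Int) :=
  let i0 := PySem.List.pyGetD i 0 0
  let i1 := PySem.List.pyGetD i 1 0
  let st := (nbr.getD i1 []).foldl (fun st j =>
    if PySem.Set.contains st.2 (j, i1, i0) then st
    else (st.1 ++ [[i0, i1, j]], st.2.add (i0, i1, j))) st
  (cen.getD i1 []).foldl (fun st x =>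
    if x ≠ i0 ∧ ¬ PySem.Set.contains st.2 (x, i1, i0) = true
    then (st.1 ++ [[i0, i1, x]], st.2.add (i0, i1, x)) else st) st

def pvNbr (list2 : List (List Int)) : PySem.Dict Int (List Int) :=
  list2.foldl (fun d j =>
    let a := PySem.List.pyGetD j 0 0
    let b := PySem.List.pyGetD j 1 0
    let d := d.modify a [] (· ++ [b])
    if b ≠ a then d.modify b [] (· ++ [a]) else d) PySem.Dict.empty

def pvCen (sub : List (List Int)) : PySem.Dict Int (List Int) :=
  sub.foldl (fun d j =>
    d.modify (PySem.List.pyGetD j 1 0) [] (· ++ [PySem.List.pyGetD j 0 0])) PySem.Dict.empty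

-- one step of the two folds agree and preserve the invariant
theorem pv_step_eq (list2 sub : List (List Int)) (i : List Int)
    (h : List (List Int)) (s : PySem.Set (Int × Int × Int)) (hinv : pvInv h s) :
    (pvStepB (pvNbr list2) (pvCen sub) (h, s) i).1 = pvStepA list2 sub h i ∧
    pvInv (pvStepA list2 sub h i) (pvStepB (pvNbr list2) (pvCen sub) (h, s) i).2 := by
  unfold pvStepA pvStepB
  generalize hI1 : PySem.List.pyGetD i 1 0 = i1
  generalize hI0 : PySem.List.pyGetD i 0 0 = i0
  dsimp only
  have hnbr : (pvNbr list2).getD i1 [] = list2.flatMap (pvContrib i1) := by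
    have hx := pv_nbr_getD i1 list2 PySem.Dict.empty
    simp only [PySem.Dict.getD_empty, List.nil_append] at hx
    exact hx
  have hcen : (pvCen sub).getD i1 [] = sub.flatMap (pvContrib2 i1) := by
    have hx := pv_cen_getD i1 sub PySem.Dict.empty
    simp only [PySem.Dict.getD_empty, List.nil_append] at hx
    exact hx
  have htm : list2.foldl (fun t j =>
      if i1 = PySem.List.pyGetD j 0 0 then t ++ [PySem.List.pyGetD j 1 0]
      else if i1 = PySem.List.pyGetD j 1 0 then t ++ [PySem.List.pyGetD j 0 0]
      else t) [] = list2.flatMap (pvContrib i1) := by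
    simpa using pv_tmpii_eq i1 list2 []
  have htm2 : sub.foldl (fun t j =>
      if i1 = PySem.List.pyGetD j 1 0 ∧ ¬ i0 = PySem.List.pyGetD j 0 0
      then t ++ [PySem.List.pyGetD j 0 0] else t) []
      = (sub.flatMap (pvContrib2 i1)).filter (fun x => decide (x ≠ i0)) := by
    simpa using pv_tmpii2_eq i0 i1 sub []
  rw [hnbr, hcen, htm, htm2]
  obtain ⟨h1eq, h1inv⟩ := pv_inner_eq i0 i1 (list2.flatMap (pvContrib i1)) h s hinv
  set stmid := (list2.flatMap (pvContrib i1)).foldl (fun st j =>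
      if PySem.Set.contains st.2 (j, i1, i0) then st
      else (st.1 ++ [[i0, i1, j]], st.2.add (i0, i1, j))) (h, s) with hstmid
  have hfun : (fun (st : List (List Int) × PySem.Set (Int × Int × Int)) x =>
      if x ≠ i0 ∧ ¬ PySem.Set.contains st.2 (x, i1, i0) = true
      then (st.1 ++ [[i0, i1, x]], st.2.add (i0, i1, x)) else st)
      = (fun st x => if decide (x ≠ i0) then
          (if PySem.Set.contains st.2 (x, i1, i0) then st
           else (st.1 ++ [[i0, i1, x]], st.2.add (i0, i1, x))) else st) := by
    funext st x
    exact pv_step2_eq i0 i1 x st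
  rw [hfun, pv_fold_filter]
  rw [← h1eq] at h1inv
  obtain ⟨h2eq, h2inv⟩ := pv_inner_eq' i0 i1
    ((sub.flatMap (pvContrib2 i1)).filter (fun x => decide (x ≠ i0))) stmid h1inv
  rw [h1eq] at h2eq h2inv
  exact ⟨h2eq, h2inv⟩

-- the whole folds agree
theorem pv_main (list2 sub : List (List Int)) (l : List (List Int))
    (h : List (List Int)) (s : PySem.Set (Int × Int × Int)) (hinv : pvInv h s) :
    (l.foldl (pvStepB (pvNbr list2) (pvCen sub)) (h, s)).1
      = l.foldl (pvStepA list2 sub) h ∧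
    pvInv (l.foldl (pvStepA list2 sub) h)
      (l.foldl (pvStepB (pvNbr list2) (pvCen sub)) (h, s)).2 := by
  induction l generalizing h s with
  | nil => exact ⟨rfl, hinv⟩
  | cons i l ih =>
      obtain ⟨heq, hinv'⟩ := pv_step_eq list2 sub i h s hinv
      simp only [List.foldl_cons]
      have : pvStepB (pvNbr list2) (pvCen sub) (h, s) i
          = (pvStepA list2 sub h i, (pvStepB (pvNbr list2) (pvCen sub) (h, s) i).2) := by
        exact Prod.ext heq rfl
      rw [this]
      exact ih _ _ hinv'

-- ===== VERDICT (by name: the statement is the Claim_ definition above) =====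
theorem hangle_spec : Claim_equal_hangle := by
  intro list1 list2 lenHbon _ _
  unfold Spec_hangle
  have hA : hangle list1 list2 lenHbon
      = (PySem.List.slice list1 (some lenHbon) none).foldl
          (pvStepA list2 (PySem.List.slice list1 (some lenHbon) none)) [] := rfl
  have hB : hangle_alt list1 list2 lenHbon
      = ((PySem.List.slice list1 (some lenHbon) none).foldl
          (pvStepB (pvNbr list2) (pvCen (PySem.List.slice list1 (some lenHbon) none)))
          ([], PySem.Set.empty)).1 := rfl
  rw [hA, hB]
  have hinv : pvInv [] PySem.Set.empty := by
    intro a b c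
    simp [PySem.Set.empty]
  exact ((pv_main list2 (PySem.List.slice list1 (some lenHbon) none)
    (PySem.List.slice list1 (some lenHbon) none) [] PySem.Set.empty hinv).1).symm
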